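-- pv_equiv track=rewrite | github.com/MaxUhl98/CuF | Prak01/aufgabe_3.py | get_pascal_matrix
-- ===== SOURCE A (Python) =====
-- from typing import List, Tuple
--
-- def get_pascal_matrix(dim: Tuple[int]) -> List[List[int]]:
--     # Überprüfe, ob die Dimensionen korrekt sind
--     assert dim[0] == dim[1] - 1
--
--     # Initialisiere die Matrix mit Nullen
--     mat = [[0 for _ in range(dim[1])] for _ in range(dim[0])]
--
--     # Setze den Wert in der ersten Zeile und zweiten Spalte auf 1
--     mat[0][1] = 1
--
--     # Fülle die Matrix gemäß der Pascal'schen Regel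
--     for i in range(1, dim[0]):
--         for j in range(1, i + 2):
--             mat[i][j] = mat[i - 1][j - 1] + mat[i - 1][j]
--
--     return mat
-- ===== SOURCE B (Python) =====
-- from typing import List, Tuple
--
-- def get_pascal_matrix(dim: Tuple[int]) -> List[List[int]]:
--     # Check the dimensions, as A does
--     assert dim[0] == dim[1] - 1
--     n = dim[0]
--     rows = []
--     for i in range(n):
--         # Build row i directly from binomial coefficients (closed form),
--         # independently of any previous row.
--         row = [0] * (n + 1)
--         c = 1
--         for k in range(i + 1):
--             row[k + 1] = c
--             c = c * (i - k) // (k + 1)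
--         rows.append(row)
--     return rows
-- ===== Notes on version B (the rewrite author's own statement) =====
-- stated objective: alternative
-- what changed: B builds each Pascal row independently from the multiplicative closed form for binomial coefficients (c = c*(i-k)//(k+1)) instead of A's row-to-row additive DP over a pre-zeroed matrix.
import Mathlib
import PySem

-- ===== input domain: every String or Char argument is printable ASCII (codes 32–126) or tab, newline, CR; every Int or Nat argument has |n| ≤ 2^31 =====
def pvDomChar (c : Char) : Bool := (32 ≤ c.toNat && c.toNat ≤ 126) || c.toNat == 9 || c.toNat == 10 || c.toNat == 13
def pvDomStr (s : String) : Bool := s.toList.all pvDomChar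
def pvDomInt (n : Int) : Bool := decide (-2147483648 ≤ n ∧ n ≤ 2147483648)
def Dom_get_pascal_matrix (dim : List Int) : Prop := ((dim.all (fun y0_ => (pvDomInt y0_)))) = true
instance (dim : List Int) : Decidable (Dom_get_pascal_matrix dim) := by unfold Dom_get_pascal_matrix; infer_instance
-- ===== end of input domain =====

-- B replaces A's additive row-to-row DP by building each Pascal row independently
-- from the multiplicative closed form for binomial coefficients (alternative decomposition, same cost).

-- ===== PORT A =====
-- one DP step: write into row i at column j the sum of the two cells above (row i-1, columns j-1 and j);
-- indices are ≥ 1 on Pre_, so Nat indexing is exact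
def pvStepA (mat : List (List Int)) (i j : Nat) : List (List Int) :=
  mat.set i ((mat.getD i []).set j (((mat.getD (i-1) []).getD (j-1) 0) + ((mat.getD (i-1) []).getD j 0)))

-- literal port of A; the assert, the two tuple accesses and the seed write into row 0
-- raise in Python exactly on the inputs excluded by Pre_ (on which this total port's value is not claimed).
def get_pascal_matrix (dim : List Int) : List (List Int) :=
  let d0 := dim.getD 0 0
  let d1 := dim.getD 1 0
  let mat0 := List.replicate d0.toNat (List.replicate d1.toNat (0:Int))
  let mat1 := mat0.set 0 ((mat0.getD 0 []).set 1 1)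
  (PySem.List.pyRange 1 d0 1).foldl (fun mat i =>
    (PySem.List.pyRange 1 (i+2) 1).foldl (fun mat j => pvStepA mat i.toNat j.toNat) mat) mat1

-- ===== PORT B =====
-- row i of B: start from n+1 zeros, then place the running binomial c at positions 1..i+1,
-- updating c multiplicatively (c = c*(i-k)//(k+1)) as in Source B
def pvRowB (i n : Nat) : List Int :=
  ((List.range (i+1)).foldl
    (fun (p : List Int × Int) k =>
      (p.1.set (k+1) p.2, PySem.Int.floordiv (p.2 * ((i:Int) - (k:Int))) ((k:Int)+1)))
    (List.replicate (n+1) (0:Int), 1)).1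

def get_pascal_matrix_alt (dim : List Int) : List (List Int) :=
  let n := (dim.getD 0 0).toNat
  (List.range n).map (fun i => pvRowB i n)

-- ===== PRECONDITION & SPEC =====
-- Pre_ excludes exactly the inputs on which A raises: tuples with fewer than 2 entries (IndexError),
-- first entry ≠ second entry - 1 (AssertionError), and first entry ≤ 0 (IndexError at the seed write into row 0).
def Pre_get_pascal_matrix (dim : List Int) : Prop :=
  2 ≤ dim.length ∧ dim.getD 0 0 = dim.getD 1 0 - 1 ∧ 1 ≤ dim.getD 0 0
instance (dim : List Int) : Decidable (Pre_get_pascal_matrix dim) := by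
  unfold Pre_get_pascal_matrix; infer_instance
def pvWitness_get_pascal_matrix : List Int := [1, 2]

def Spec_get_pascal_matrix (dim : List Int) (out : List (List Int)) : Prop := out = get_pascal_matrix_alt dim
instance (dim : List Int) (out : List (List Int)) : Decidable (Spec_get_pascal_matrix dim out) := by unfold Spec_get_pascal_matrix; infer_instance

-- ===== CLAIM (what is proved, stated in full; the proofs are below) =====
def Claim_equal_get_pascal_matrix : Prop := ∀ (dim : List Int), Dom_get_pascal_matrix dim → Pre_get_pascal_matrix dim → Spec_get_pascal_matrix dim (get_pascal_matrix dim)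

-- ===== LEMMAS AND PROOFS =====

def pvG (i k : Nat) : Int := (Nat.choose i k : Int)
lemma pv_floordiv_cancel (a : Int) (b : Nat) :
    PySem.Int.floordiv (a * ((b:Int)+1)) ((b:Int)+1) = a := by
  rw [PySem.Int.floordiv_eq_ediv_of_pos (by positivity)]
  exact Int.mul_ediv_cancel a (by positivity)

lemma pvG_step (i m : Nat) :
    PySem.Int.floordiv (pvG i m * ((i:Int) - m)) ((m:Int)+1) = pvG i (m+1) := by
  by_cases h : m ≤ i
  · have key : pvG i m * ((i:Int) - m) = pvG i (m+1) * ((m:Int)+1) := by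
      have h2 := Nat.choose_succ_right_eq i m
      unfold pvG
      have hc : ((i:Int) - m) = ((i - m : Nat) : Int) := by
        push_cast [Nat.cast_sub h]; ring
      rw [hc, ← Nat.cast_mul, ← h2]
      push_cast; ring
    rw [key, pv_floordiv_cancel]
  · have h0 : Nat.choose i m = 0 := Nat.choose_eq_zero_of_lt (by omega)
    have h1 : Nat.choose i (m+1) = 0 := Nat.choose_eq_zero_of_lt (by omega)
    simp [pvG, h0, h1, PySem.Int.floordiv]

lemma pv_set_next (L : List Int) (n m : Nat) (hL : L.length = m) (hm : m < n) (v : Int) :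
    (0 :: L ++ List.replicate (n - m) (0:Int)).set (m+1) v
      = 0 :: (L ++ [v]) ++ List.replicate (n - (m+1)) (0:Int) := by
  have hrep : List.replicate (n - m) (0:Int) = 0 :: List.replicate (n - (m+1)) 0 := by
    rw [← List.replicate_succ]; congr 1; omega
  rw [show ((0:Int) :: L ++ List.replicate (n - m) (0:Int)).set (m+1) v
        = 0 :: (L ++ List.replicate (n - m) (0:Int)).set m v from List.set_cons_succ ..,
      List.set_append_right _ _ (by omega), hL, Nat.sub_self, hrep]
  simp

def pvRowA (i n : Nat) : List Int :=
  0 :: (List.range (i+1)).map (pvG i) ++ List.replicate (n - (i+1)) 0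

lemma pvRowA_getD (p n j : Nat) :
    (pvRowA p n).getD j 0 = if 1 ≤ j ∧ j ≤ p+1 then pvG p (j-1) else 0 := by
  match j with
  | 0 => simp [pvRowA]
  | j+1 =>
    simp only [pvRowA, List.getD_cons_succ]
    rcases Nat.lt_or_ge j (p+1) with h | h
    · rw [List.getD_append _ _ _ _ (by simpa using h)]
      simp [List.getD_eq_getElem?_getD, Nat.lt_iff_add_one_le.mp h, h]
    · rw [List.getD_append_right _ _ _ _ (by simpa using h)]
      have hif : ¬ (1 ≤ j+1 ∧ j+1 ≤ p+1) := by omega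
      have hj : ¬ j ≤ p := by omega
      simp only [hif, if_false, List.getD_eq_getElem?_getD, List.getElem?_replicate, hj]
      split <;> simp
lemma pvA_value (p m : Nat) (hm : m ≤ p+1) (n : Nat) :
    (pvRowA p n).getD m 0 + (pvRowA p n).getD (m+1) 0 = pvG (p+1) m := by
  rw [pvRowA_getD, pvRowA_getD]
  match m with
  | 0 => simp [pvG]
  | m+1 =>
    have h1 : (1 ≤ m+1 ∧ m+1 ≤ p+1) := by omega
    simp only [h1, if_true, Nat.add_sub_cancel]
    by_cases h2 : m+2 ≤ p+1
    · have h3 : (1 ≤ m+2 ∧ m+2 ≤ p+1) := by omega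
      simp only [h3, if_true, Nat.add_sub_cancel]
      unfold pvG
      simp only [if_pos trivial, and_self, if_true]
      rw [← Nat.cast_add, ← Nat.choose_succ_succ]
    · have h3 : ¬ (1 ≤ m+2 ∧ m+2 ≤ p+1) := by omega
      have hm2 : m + 1 = p + 1 := by omega
      have hz : Nat.choose p (m+1) = 0 := Nat.choose_eq_zero_of_lt (by omega)
      have hz2 : Nat.choose (p+1) (m+1) = 1 := by rw [hm2, Nat.choose_self]
      have hz3 : Nat.choose p m = 1 := by
        have : m = p := by omega
        rw [this, Nat.choose_self]
      simp [h3, pvG, hz2, hz3]; omega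

lemma pvRowB_invariant (i n : Nat) : ∀ m, m ≤ n →
    (List.range m).foldl
      (fun (p : List Int × Int) k =>
        (p.1.set (k+1) p.2, PySem.Int.floordiv (p.2 * ((i:Int) - (k:Int))) ((k:Int)+1)))
      (List.replicate (n+1) (0:Int), 1)
    = (0 :: (List.range m).map (pvG i) ++ List.replicate (n - m) 0, pvG i m) := by
  intro m hm
  induction m with
  | zero => simp [pvG, List.replicate_succ]
  | succ m ih =>
    rw [List.range_succ, List.foldl_append, ih (by omega)]
    simp only [List.foldl_cons, List.foldl_nil]
    rw [Prod.mk.injEq]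
    constructor
    · rw [pv_set_next _ _ _ (by simp) (by omega), List.map_append]
      simp
    · exact pvG_step i m

lemma pvRowB_eq (i n : Nat) (h : i < n) : pvRowB i n = pvRowA i n := by
  unfold pvRowB pvRowA
  rw [pvRowB_invariant i n (i+1) (by omega)]

lemma pvRowA_build (p n : Nat) (hp : p + 1 < n) : ∀ m, m ≤ p+2 →
    (List.range m).foldl
      (fun r k => r.set (k+1) ((pvRowA p n).getD k 0 + (pvRowA p n).getD (k+1) 0))
      (List.replicate (n+1) (0:Int))
    = 0 :: (List.range m).map (pvG (p+1)) ++ List.replicate (n - m) 0 := by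
  intro m hm
  induction m with
  | zero => simp [List.replicate_succ]
  | succ m ih =>
    rw [List.range_succ, List.foldl_append, ih (by omega)]
    simp only [List.foldl_cons, List.foldl_nil]
    rw [pvA_value p m (by omega) n, pv_set_next _ _ _ (by simp) (by omega), List.map_append]
    simp

lemma pvA_inner (mat : List (List Int)) (i : Nat) (hi : 1 ≤ i) (hlen : i < mat.length)
    (js : List Int) : ∀ r,
    js.foldl (fun m j => pvStepA m i j.toNat) (mat.set i r)
      = mat.set i (js.foldl (fun r j =>
          r.set j.toNat ((mat.getD (i-1) []).getD (j.toNat - 1) 0 + (mat.getD (i-1) []).getD j.toNat 0)) r) := by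
  induction js with
  | nil => intro r; rfl
  | cons j js ih =>
    intro r
    simp only [List.foldl_cons]
    rw [← ih]
    congr 1
    unfold pvStepA
    have h1 : (mat.set i r).getD i [] = r := by
      rw [List.getD_eq_getElem?_getD, List.getElem?_set_self' ]
      simp [hlen]
    have h2 : (mat.set i r).getD (i-1) [] = mat.getD (i-1) [] := by
      rw [List.getD_eq_getElem?_getD, List.getElem?_set_ne (by omega), ← List.getD_eq_getElem?_getD]
    rw [h1, h2, List.set_set]

def pvM (t n : Nat) : List (List Int) :=
  (List.range t).map (fun q => pvRowA q n) ++ List.replicate (n - t) (List.replicate (n+1) 0)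

lemma pvM_cons_zero (t n : Nat) (h : t < n) :
    pvM t n = (List.range t).map (fun q => pvRowA q n)
      ++ List.replicate (n+1) 0 :: List.replicate (n - (t+1)) (List.replicate (n+1) 0) := by
  unfold pvM
  congr 1
  rw [← List.replicate_succ]
  congr 1; omega

lemma pvM_set (t n : Nat) (h : t < n) (r : List Int) :
    (pvM t n).set t r = (List.range t).map (fun q => pvRowA q n)
      ++ r :: List.replicate (n - (t+1)) (List.replicate (n+1) 0) := by
  rw [pvM_cons_zero t n h, List.set_append_right _ _ (by simp)]
  simp

lemma pvM_self_set (t n : Nat) (h : t < n) :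
    pvM t n = (pvM t n).set t (List.replicate (n+1) 0) := by
  rw [pvM_set t n h, pvM_cons_zero t n h]

lemma pvM_length (t n : Nat) (h : t ≤ n) : (pvM t n).length = n := by
  simp [pvM]; omega

lemma pvM_getD_lt (q t n : Nat) (h : q < t) : (pvM t n).getD q [] = pvRowA q n := by
  unfold pvM
  rw [List.getD_append _ _ _ _ (by simpa using h)]
  simp [List.getD_eq_getElem?_getD, h]

lemma pvM_set_succ (t n : Nat) (h : t + 1 < n) :
    (pvM (t+1) n).set (t+1) (pvRowA (t+1) n) = pvM (t+2) n := by
  rw [pvM_set (t+1) n (by omega)]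
  unfold pvM
  simp [List.range_succ]

lemma pvA_outer (n : Nat) (hn : 1 ≤ n) : ∀ t, t ≤ n - 1 →
    (PySem.List.pyRange 1 (1+(t:Int)) 1).foldl (fun mat i =>
      (PySem.List.pyRange 1 (i+2) 1).foldl (fun mat j => pvStepA mat i.toNat j.toNat) mat) (pvM 1 n)
    = pvM (t+1) n := by
  intro t ht
  induction t with
  | zero => simp [PySem.List.pyRange_one_eq_nil]
  | succ t ih =>
    push_cast
    rw [show (1 + ((t:Int)+1)) = (1 + (t:Int)) + 1 by ring,
        PySem.List.pyRange_one_succ_right (by omega), List.foldl_append, ih (by omega)]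
    simp only [List.foldl_cons, List.foldl_nil]
    -- the inner fold for row i = t+1
    have hlen : t + 1 < (pvM (t+1) n).length := by rw [pvM_length _ _ (by omega)]; omega
    have htn : (1 + (t:Int)).toNat = t + 1 := by omega
    rw [pvM_self_set (t+1) n (by omega)]
    rw [show ((1:Int) + t + 2) = 1 + ((t:Int) + 2) by ring]
    simp only [htn]
    rw [pvA_inner (pvM (t+1) n) (t+1) (by omega) hlen _ _]
    have hprev : (pvM (t+1) n).getD (t+1-1) [] = pvRowA t n := by
      simpa using pvM_getD_lt t (t+1) n (by omega)
    rw [hprev, PySem.List.pyRange_one, List.foldl_map,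
        show ((1:Int) + ((t:Int)+2) - 1).toNat = t + 2 by omega]
    simp only [show ∀ k:Nat, ((1:Int)+(k:Int)).toNat = k+1 from fun k => by omega,
               Nat.add_sub_cancel]
    rw [pvRowA_build t n (by omega) (t+2) (by omega),
        show (0 :: (List.range (t+2)).map (pvG (t+1)) ++ List.replicate (n-(t+2)) (0:Int)) = pvRowA (t+1) n from rfl]
    exact pvM_set_succ t n (by omega)

lemma pv_init (n : Nat) (hn : 1 ≤ n) :
    (List.replicate n (List.replicate (n+1) (0:Int))).set 0
      (((List.replicate n (List.replicate (n+1) (0:Int))).getD 0 []).set 1 1) = pvM 1 n := by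
  obtain ⟨m, rfl⟩ : ∃ m, n = m + 1 := ⟨n - 1, by omega⟩
  simp only [List.replicate_succ, List.getD_cons_zero, List.set_cons_zero]
  unfold pvM
  simp [pvRowA, pvG, List.replicate_succ]

lemma pv_main (n : Nat) (hn : 1 ≤ n) :
    (PySem.List.pyRange 1 (n:Int) 1).foldl (fun mat i =>
      (PySem.List.pyRange 1 (i+2) 1).foldl (fun mat j => pvStepA mat i.toNat j.toNat) mat)
      ((List.replicate n (List.replicate (n+1) (0:Int))).set 0
        (((List.replicate n (List.replicate (n+1) (0:Int))).getD 0 []).set 1 1))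
    = (List.range n).map (fun i => pvRowB i n) := by
  rw [pv_init n hn,
      show ((n:Int)) = 1 + ((n-1 : Nat) : Int) by push_cast; omega,
      pvA_outer n hn (n-1) (by omega),
      show n - 1 + 1 = n by omega]
  unfold pvM
  rw [Nat.sub_self, List.replicate_zero, List.append_nil]
  exact (List.map_congr_left fun i hi => (pvRowB_eq i n (List.mem_range.mp hi)).symm)

-- ===== VERDICT (by name: the statement is the Claim_ definition above) =====
theorem get_pascal_matrix_spec : Claim_equal_get_pascal_matrix := by
  intro dim _ hpre
  obtain ⟨hlen, heq, hpos⟩ := hpre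
  unfold Spec_get_pascal_matrix get_pascal_matrix get_pascal_matrix_alt
  simp only []
  have hd1 : (dim.getD 1 0).toNat = (dim.getD 0 0).toNat + 1 := by omega
  have hn : 1 ≤ (dim.getD 0 0).toNat := by omega
  rw [hd1, show PySem.List.pyRange 1 (dim.getD 0 0) 1
        = PySem.List.pyRange 1 (((dim.getD 0 0).toNat : Nat) : Int) 1 by
      congr 1; omega]
  exact pv_main (dim.getD 0 0).toNat hn
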